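-- pv_equiv track=rewrite | github.com/UdayG01/VoiceAI-Rena | src/rag_integration/src/create_json_index_v3.py | classify_context_type
-- ===== SOURCE A (Python) =====
-- def classify_context_type(json_path: str) -> str:
--     """Classify the context type based on JSON path keywords."""
--     path_lower = json_path.lower()
--
--     if "knowledge_repository" in path_lower or "compliance" in path_lower:
--         return "compliance_info"
--     elif "case_studies" in path_lower:
--         return "case_study"
--     elif "cross_cutting" in path_lower or "analytics" in path_lower:
--         return "technology_stack"
--     elif any(
--         x in path_lower
--         for x in ["organization", "founder", "company_name", "location", "team"]
--     ):
--         return "company_info"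
--     elif any(
--         x in path_lower for x in ["market_presence", "customer", "industry", "clients"]
--     ):
--         return "market_info"
--     elif any(
--         x in path_lower for x in ["solution", "capabilities", "production", "quality"]
--     ):
--         return "solution_info"
--     else:
--         return "general_info"
-- ===== SOURCE B (Python) =====
-- # Flat keyword table in ALPHABETICAL order: (keyword, priority, label).
-- # The answer is the label of the minimum-priority keyword occurring in the
-- # path; the scan order is irrelevant, so the table is kept alphabetical.
-- KEYWORD_TABLE = [
--     ("analytics", 2, "technology_stack"),
--     ("capabilities", 5, "solution_info"),
--     ("case_studies", 1, "case_study"),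
--     ("clients", 4, "market_info"),
--     ("company_name", 3, "company_info"),
--     ("compliance", 0, "compliance_info"),
--     ("cross_cutting", 2, "technology_stack"),
--     ("customer", 4, "market_info"),
--     ("founder", 3, "company_info"),
--     ("industry", 4, "market_info"),
--     ("knowledge_repository", 0, "compliance_info"),
--     ("location", 3, "company_info"),
--     ("market_presence", 4, "market_info"),
--     ("organization", 3, "company_info"),
--     ("production", 5, "solution_info"),
--     ("quality", 5, "solution_info"),
--     ("solution", 5, "solution_info"),
--     ("team", 3, "company_info"),
-- ]
--
--
-- def classify_context_type(json_path: str) -> str: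
--     """Classify the context type based on JSON path keywords."""
--     path_lower = json_path.lower()
--     best = None  # (priority, label) of the best keyword seen so far
--     for keyword, priority, label in KEYWORD_TABLE:
--         if keyword in path_lower and (best is None or priority < best[0]):
--             best = (priority, label)
--     return best[1] if best is not None else "general_info"
-- ===== Notes on version B (the rewrite author's own statement) =====
-- stated objective: alternative
-- what changed: Replaces A's priority-ordered if/elif early-return chain by a single alphabetical scan over a flat keyword->(priority,label) table that aggregates the minimum-priority matching keyword with an accumulator and returns its label (default general_info); correctness rests on min-aggregation, not on check order.
import Mathlib
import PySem

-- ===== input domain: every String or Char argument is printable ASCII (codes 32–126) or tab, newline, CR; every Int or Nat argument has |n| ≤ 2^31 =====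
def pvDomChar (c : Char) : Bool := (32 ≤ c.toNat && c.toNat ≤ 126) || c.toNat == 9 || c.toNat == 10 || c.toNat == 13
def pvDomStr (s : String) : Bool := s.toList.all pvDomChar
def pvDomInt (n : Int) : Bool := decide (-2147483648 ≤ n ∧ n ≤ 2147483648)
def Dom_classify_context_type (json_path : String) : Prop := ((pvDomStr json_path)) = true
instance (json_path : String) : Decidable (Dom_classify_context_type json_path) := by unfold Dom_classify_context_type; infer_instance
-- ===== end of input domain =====

-- B replaces A's priority-ordered if/elif early-return chain by an alphabetical scan of a flat
-- keyword table that aggregates the minimum-priority match with an accumulator (alternative).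


-- ===== PORT A =====
-- Literal transliteration of A's if/elif chain; 'any(x in path_lower for x in [...])' is List.any.
def classify_context_type (json_path : String) : String :=
  let path_lower := PySem.Str.lower json_path
  if PySem.Str.isIn "knowledge_repository" path_lower || PySem.Str.isIn "compliance" path_lower then
    "compliance_info"
  else if PySem.Str.isIn "case_studies" path_lower then
    "case_study"
  else if PySem.Str.isIn "cross_cutting" path_lower || PySem.Str.isIn "analytics" path_lower then
    "technology_stack"
  else if (["organization", "founder", "company_name", "location", "team"] : List String).any
      (fun x => PySem.Str.isIn x path_lower) then
    "company_info"
  else if (["market_presence", "customer", "industry", "clients"] : List String).any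
      (fun x => PySem.Str.isIn x path_lower) then
    "market_info"
  else if (["solution", "capabilities", "production", "quality"] : List String).any
      (fun x => PySem.Str.isIn x path_lower) then
    "solution_info"
  else
    "general_info"

-- ===== PORT B =====
-- B: flat keyword table in ALPHABETICAL order; the loop keeps the minimum-priority match.
def pvKeywordTable : List (String × Nat × String) :=
  [("analytics", 2, "technology_stack"),
   ("capabilities", 5, "solution_info"),
   ("case_studies", 1, "case_study"),
   ("clients", 4, "market_info"),
   ("company_name", 3, "company_info"),
   ("compliance", 0, "compliance_info"),
   ("cross_cutting", 2, "technology_stack"),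
   ("customer", 4, "market_info"),
   ("founder", 3, "company_info"),
   ("industry", 4, "market_info"),
   ("knowledge_repository", 0, "compliance_info"),
   ("location", 3, "company_info"),
   ("market_presence", 4, "market_info"),
   ("organization", 3, "company_info"),
   ("production", 5, "solution_info"),
   ("quality", 5, "solution_info"),
   ("solution", 5, "solution_info"),
   ("team", 3, "company_info")]

-- one iteration of Source B's loop body: keep the match of strictly smaller priority
def pvBest (path_lower : String) (best : Option (Nat × String))
    (e : String × Nat × String) : Option (Nat × String) :=
  if PySem.Str.isIn e.1 path_lower &&
      (match best with | none => true | some b => decide (e.2.1 < b.1)) then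
    some e.2
  else best

def classify_context_type_alt (json_path : String) : String :=
  let path_lower := PySem.Str.lower json_path
  match pvKeywordTable.foldl (pvBest path_lower) none with
  | some b => b.2
  | none => "general_info"

-- ===== PRECONDITION & SPEC =====
def Spec_classify_context_type (json_path : String) (out : String) : Prop := out = classify_context_type_alt json_path
instance (json_path : String) (out : String) : Decidable (Spec_classify_context_type json_path out) := by unfold Spec_classify_context_type; infer_instance

-- ===== CLAIM (what is proved, stated in full; the proofs are below) =====
def Claim_equal_classify_context_type : Prop := ∀ (json_path : String), Dom_classify_context_type json_path → Spec_classify_context_type json_path (classify_context_type json_path)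

-- ===== LEMMAS AND PROOFS =====

-- B's loop step with the membership test abstracted to a boolean flag
def pvBestB (best : Option (Nat × String)) (e : Bool × Nat × String) : Option (Nat × String) :=
  if e.1 && (match best with | none => true | some b => decide (e.2.1 < b.1)) then
    some e.2
  else best

-- starting from an accumulator, the loop's result never has larger priority
theorem pv_foldl_le_acc (l : List (Bool × Nat × String)) :
    ∀ (p : Nat) (x : String), ∃ b, l.foldl pvBestB (some (p, x)) = some b ∧ b.1 ≤ p := by
  induction l with
  | nil => intro p x; exact ⟨(p, x), rfl, le_refl p⟩
  | cons h t ih =>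
    intro p x
    obtain ⟨f, q, y⟩ := h
    by_cases hc : (f && decide (q < p)) = true
    · obtain ⟨b, hb, hle⟩ := ih q y
      refine ⟨b, by simpa [pvBestB, hc] using hb, ?_⟩
      have : q < p := of_decide_eq_true (Bool.and_elim_right hc)
      omega
    · obtain ⟨b, hb, hle⟩ := ih p x
      exact ⟨b, by simpa [pvBestB, hc] using hb, hle⟩

-- any matched entry bounds the final priority from above
theorem pv_foldl_min (l : List (Bool × Nat × String)) :
    ∀ (acc : Option (Nat × String)) (e : Bool × Nat × String), e ∈ l → e.1 = true →
      ∃ b, l.foldl pvBestB acc = some b ∧ b.1 ≤ e.2.1 := by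
  induction l with
  | nil => intro _ e he _; exact absurd he List.not_mem_nil
  | cons h t ih =>
    intro acc e he hf
    obtain ⟨f, q, y⟩ := h
    rcases List.mem_cons.mp he with rfl | hmem
    · simp only at hf
      cases acc with
      | none =>
        obtain ⟨b, hb, hle⟩ := pv_foldl_le_acc t q y
        exact ⟨b, by simpa [pvBestB, hf] using hb, hle⟩
      | some a =>
        by_cases hq : q < a.1
        · obtain ⟨b, hb, hle⟩ := pv_foldl_le_acc t q y
          exact ⟨b, by simpa [pvBestB, hf, hq] using hb, hle⟩
        · obtain ⟨b, hb, hle⟩ := pv_foldl_le_acc t a.1 a.2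
          refine ⟨b, ?_, by simp only; omega⟩
          simpa [pvBestB, hf, hq] using hb
    · exact ih (pvBestB acc (f, q, y)) e hmem hf

-- the loop's result is the accumulator or some matched entry
theorem pv_foldl_mem (l : List (Bool × Nat × String)) :
    ∀ (acc : Option (Nat × String)) (b : Nat × String), l.foldl pvBestB acc = some b →
      acc = some b ∨ ∃ e, e ∈ l ∧ e.1 = true ∧ e.2 = b := by
  induction l with
  | nil => intro acc b h; exact Or.inl h
  | cons h t ih =>
    intro acc b hfold
    obtain ⟨f, q, y⟩ := h
    rcases ih (pvBestB acc (f, q, y)) b hfold with hacc | ⟨e, he, hef, heb⟩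
    · cases acc with
      | none =>
        by_cases hf : f = true
        · have hstep : pvBestB none (f, q, y) = some (q, y) := by simp [pvBestB, hf]
          rw [hstep] at hacc
          exact Or.inr ⟨(f, q, y), List.mem_cons_self, hf, Option.some.inj hacc⟩
        · have hstep : pvBestB none (f, q, y) = none := by
            simp [pvBestB, hf]
          rw [hstep] at hacc
          exact absurd hacc (by simp)
      | some a =>
        by_cases hc : (f && decide (q < a.1)) = true
        · have hstep : pvBestB (some a) (f, q, y) = some (q, y) := by simp [pvBestB, hc]
          rw [hstep] at hacc
          exact Or.inr ⟨(f, q, y), List.mem_cons_self, Bool.and_elim_left hc, Option.some.inj hacc⟩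
        · have hstep : pvBestB (some a) (f, q, y) = some a := by
            simp only [pvBestB]
            rw [if_neg]
            simpa using hc
          rw [hstep] at hacc
          exact Or.inl hacc
    · exact Or.inr ⟨e, List.mem_cons_of_mem _ he, hef, heb⟩

-- if no flag is set the loop returns nothing
theorem pv_foldl_none (l : List (Bool × Nat × String)) (h : ∀ e ∈ l, e.1 = false) :
    l.foldl pvBestB none = none := by
  induction l with
  | nil => rfl
  | cons hd t ih =>
    have hhd : hd.1 = false := h hd List.mem_cons_self
    have hstep : pvBestB none hd = none := by simp [pvBestB, hhd]
    rw [List.foldl_cons, hstep]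
    exact ih fun e he => h e (List.mem_cons_of_mem _ he)

-- the fold evaluates to lbl when some (flag,p,lbl) entry matches, no matched entry has smaller
-- priority, and every matched priority-p entry is labelled lbl
theorem pv_fold_eval (l : List (Bool × Nat × String)) (p : Nat) (lbl : String) (g : Bool)
    (hg : g = true) (hmem : (g, p, lbl) ∈ l)
    (hno : ∀ e ∈ l, e.1 = true → p ≤ e.2.1)
    (hlab : ∀ e ∈ l, e.1 = true → e.2.1 = p → e.2.2 = lbl) :
    (match l.foldl pvBestB none with | some b => b.2 | none => "general_info") = lbl := by
  obtain ⟨b, hfold, hle⟩ := pv_foldl_min l none (g, p, lbl) hmem hg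
  rcases pv_foldl_mem l none b hfold with hacc | ⟨e, he, hef, heb⟩
  · exact absurd hacc (by simp)
  · rw [hfold]
    have h1 : p ≤ e.2.1 := hno e he hef
    have h2 : e.2.1 = b.1 := by rw [heb]
    have hp : e.2.1 = p := by simp only at hle; omega
    have := hlab e he hef hp
    simp only [← heb, this]

-- A's chain abstracted over the 18 membership booleans (named by keyword)
def pvChainA (kr co cs cc an og fo cn lo te mp cu ind cl so cap pr qu : Bool) : String :=
  if kr || co then "compliance_info"
  else if cs then "case_study"
  else if cc || an then "technology_stack"
  else if og || fo || cn || lo || te then "company_info"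
  else if mp || cu || ind || cl then "market_info"
  else if so || cap || pr || qu then "solution_info"
  else "general_info"

-- B's fold abstracted over the same 18 booleans (alphabetical table order)
def pvTbl (kr co cs cc an og fo cn lo te mp cu ind cl so cap pr qu : Bool) : List (Bool × Nat × String) :=
  [(an, 2, "technology_stack"), (cap, 5, "solution_info"), (cs, 1, "case_study"),
   (cl, 4, "market_info"), (cn, 3, "company_info"), (co, 0, "compliance_info"),
   (cc, 2, "technology_stack"), (cu, 4, "market_info"), (fo, 3, "company_info"),
   (ind, 4, "market_info"), (kr, 0, "compliance_info"), (lo, 3, "company_info"),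
   (mp, 4, "market_info"), (og, 3, "company_info"), (pr, 5, "solution_info"),
   (qu, 5, "solution_info"), (so, 5, "solution_info"), (te, 3, "company_info")]

def pvFoldB (kr co cs cc an og fo cn lo te mp cu ind cl so cap pr qu : Bool) : String :=
  match (pvTbl kr co cs cc an og fo cn lo te mp cu ind cl so cap pr qu).foldl pvBestB none with
  | some b => b.2
  | none => "general_info"

-- core fact: on every valuation of the 18 booleans the chain and the min-fold agree
theorem pvChain_eq_fold (kr co cs cc an og fo cn lo te mp cu ind cl so cap pr qu : Bool) :
    pvChainA kr co cs cc an og fo cn lo te mp cu ind cl so cap pr qu =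
    pvFoldB kr co cs cc an og fo cn lo te mp cu ind cl so cap pr qu := by
  unfold pvChainA pvFoldB
  split_ifs with h1 h2 h3 h4 h5 h6
  · -- priority 0: compliance_info
    have hx : ∃ g : Bool, g = true ∧ (g = kr ∨ g = co) := by
      rcases Bool.or_eq_true_iff.mp h1 with h | h
      · exact ⟨kr, h, Or.inl rfl⟩
      · exact ⟨co, h, Or.inr rfl⟩
    obtain ⟨g, hg, hgm⟩ := hx
    have hmem : (g, 0, "compliance_info") ∈ pvTbl kr co cs cc an og fo cn lo te mp cu ind cl so cap pr qu := by
      rcases hgm with rfl|rfl <;> simp [pvTbl]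
    exact (pv_fold_eval _ 0 _ g hg hmem
      (by
        intro e he hf
        simp only [pvTbl, List.mem_cons, List.not_mem_nil, or_false] at he
        rcases he with rfl|rfl|rfl|rfl|rfl|rfl|rfl|rfl|rfl|rfl|rfl|rfl|rfl|rfl|rfl|rfl|rfl|rfl <;> simp_all)
      (by
        intro e he hf hp
        simp only [pvTbl, List.mem_cons, List.not_mem_nil, or_false] at he
        rcases he with rfl|rfl|rfl|rfl|rfl|rfl|rfl|rfl|rfl|rfl|rfl|rfl|rfl|rfl|rfl|rfl|rfl|rfl <;> simp_all)).symm
  · -- priority 1: case_study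
    exact (pv_fold_eval _ 1 _ cs h2 (by simp [pvTbl])
      (by
        intro e he hf
        simp only [pvTbl, List.mem_cons, List.not_mem_nil, or_false] at he
        rcases he with rfl|rfl|rfl|rfl|rfl|rfl|rfl|rfl|rfl|rfl|rfl|rfl|rfl|rfl|rfl|rfl|rfl|rfl <;> simp_all)
      (by
        intro e he hf hp
        simp only [pvTbl, List.mem_cons, List.not_mem_nil, or_false] at he
        rcases he with rfl|rfl|rfl|rfl|rfl|rfl|rfl|rfl|rfl|rfl|rfl|rfl|rfl|rfl|rfl|rfl|rfl|rfl <;> simp_all)).symm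
  · -- priority 2: technology_stack
    have hx : ∃ g : Bool, g = true ∧ (g = cc ∨ g = an) := by
      rcases Bool.or_eq_true_iff.mp h3 with h | h
      · exact ⟨cc, h, Or.inl rfl⟩
      · exact ⟨an, h, Or.inr rfl⟩
    obtain ⟨g, hg, hgm⟩ := hx
    have hmem : (g, 2, "technology_stack") ∈ pvTbl kr co cs cc an og fo cn lo te mp cu ind cl so cap pr qu := by
      rcases hgm with rfl|rfl <;> simp [pvTbl]
    exact (pv_fold_eval _ 2 _ g hg hmem
      (by
        intro e he hf
        simp only [pvTbl, List.mem_cons, List.not_mem_nil, or_false] at he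
        rcases he with rfl|rfl|rfl|rfl|rfl|rfl|rfl|rfl|rfl|rfl|rfl|rfl|rfl|rfl|rfl|rfl|rfl|rfl <;> simp_all)
      (by
        intro e he hf hp
        simp only [pvTbl, List.mem_cons, List.not_mem_nil, or_false] at he
        rcases he with rfl|rfl|rfl|rfl|rfl|rfl|rfl|rfl|rfl|rfl|rfl|rfl|rfl|rfl|rfl|rfl|rfl|rfl <;> simp_all)).symm
  · -- priority 3: company_info
    have hx : ∃ g : Bool, g = true ∧ (g = og ∨ g = fo ∨ g = cn ∨ g = lo ∨ g = te) := by
      rcases Bool.or_eq_true_iff.mp h4 with h | h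
      · rcases Bool.or_eq_true_iff.mp h with h | h
        · rcases Bool.or_eq_true_iff.mp h with h | h
          · rcases Bool.or_eq_true_iff.mp h with h | h
            · exact ⟨og, h, Or.inl rfl⟩
            · exact ⟨fo, h, Or.inr (Or.inl rfl)⟩
          · exact ⟨cn, h, Or.inr (Or.inr (Or.inl rfl))⟩
        · exact ⟨lo, h, Or.inr (Or.inr (Or.inr (Or.inl rfl)))⟩
      · exact ⟨te, h, Or.inr (Or.inr (Or.inr (Or.inr rfl)))⟩
    obtain ⟨g, hg, hgm⟩ := hx
    have hmem : (g, 3, "company_info") ∈ pvTbl kr co cs cc an og fo cn lo te mp cu ind cl so cap pr qu := by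
      rcases hgm with rfl|rfl|rfl|rfl|rfl <;> simp [pvTbl]
    exact (pv_fold_eval _ 3 _ g hg hmem
      (by
        intro e he hf
        simp only [pvTbl, List.mem_cons, List.not_mem_nil, or_false] at he
        rcases he with rfl|rfl|rfl|rfl|rfl|rfl|rfl|rfl|rfl|rfl|rfl|rfl|rfl|rfl|rfl|rfl|rfl|rfl <;> simp_all)
      (by
        intro e he hf hp
        simp only [pvTbl, List.mem_cons, List.not_mem_nil, or_false] at he
        rcases he with rfl|rfl|rfl|rfl|rfl|rfl|rfl|rfl|rfl|rfl|rfl|rfl|rfl|rfl|rfl|rfl|rfl|rfl <;> simp_all)).symm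
  · -- priority 4: market_info
    have hx : ∃ g : Bool, g = true ∧ (g = mp ∨ g = cu ∨ g = ind ∨ g = cl) := by
      rcases Bool.or_eq_true_iff.mp h5 with h | h
      · rcases Bool.or_eq_true_iff.mp h with h | h
        · rcases Bool.or_eq_true_iff.mp h with h | h
          · exact ⟨mp, h, Or.inl rfl⟩
          · exact ⟨cu, h, Or.inr (Or.inl rfl)⟩
        · exact ⟨ind, h, Or.inr (Or.inr (Or.inl rfl))⟩
      · exact ⟨cl, h, Or.inr (Or.inr (Or.inr rfl))⟩
    obtain ⟨g, hg, hgm⟩ := hx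
    have hmem : (g, 4, "market_info") ∈ pvTbl kr co cs cc an og fo cn lo te mp cu ind cl so cap pr qu := by
      rcases hgm with rfl|rfl|rfl|rfl <;> simp [pvTbl]
    exact (pv_fold_eval _ 4 _ g hg hmem
      (by
        intro e he hf
        simp only [pvTbl, List.mem_cons, List.not_mem_nil, or_false] at he
        rcases he with rfl|rfl|rfl|rfl|rfl|rfl|rfl|rfl|rfl|rfl|rfl|rfl|rfl|rfl|rfl|rfl|rfl|rfl <;> simp_all)
      (by
        intro e he hf hp
        simp only [pvTbl, List.mem_cons, List.not_mem_nil, or_false] at he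
        rcases he with rfl|rfl|rfl|rfl|rfl|rfl|rfl|rfl|rfl|rfl|rfl|rfl|rfl|rfl|rfl|rfl|rfl|rfl <;> simp_all)).symm
  · -- priority 5: solution_info
    have hx : ∃ g : Bool, g = true ∧ (g = so ∨ g = cap ∨ g = pr ∨ g = qu) := by
      rcases Bool.or_eq_true_iff.mp h6 with h | h
      · rcases Bool.or_eq_true_iff.mp h with h | h
        · rcases Bool.or_eq_true_iff.mp h with h | h
          · exact ⟨so, h, Or.inl rfl⟩
          · exact ⟨cap, h, Or.inr (Or.inl rfl)⟩
        · exact ⟨pr, h, Or.inr (Or.inr (Or.inl rfl))⟩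
      · exact ⟨qu, h, Or.inr (Or.inr (Or.inr rfl))⟩
    obtain ⟨g, hg, hgm⟩ := hx
    have hmem : (g, 5, "solution_info") ∈ pvTbl kr co cs cc an og fo cn lo te mp cu ind cl so cap pr qu := by
      rcases hgm with rfl|rfl|rfl|rfl <;> simp [pvTbl]
    exact (pv_fold_eval _ 5 _ g hg hmem
      (by
        intro e he hf
        simp only [pvTbl, List.mem_cons, List.not_mem_nil, or_false] at he
        rcases he with rfl|rfl|rfl|rfl|rfl|rfl|rfl|rfl|rfl|rfl|rfl|rfl|rfl|rfl|rfl|rfl|rfl|rfl <;> simp_all)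
      (by
        intro e he hf hp
        simp only [pvTbl, List.mem_cons, List.not_mem_nil, or_false] at he
        rcases he with rfl|rfl|rfl|rfl|rfl|rfl|rfl|rfl|rfl|rfl|rfl|rfl|rfl|rfl|rfl|rfl|rfl|rfl <;> simp_all)).symm
  · -- nothing matched: general_info
    rw [pv_foldl_none _ (by
      intro e he
      simp only [pvTbl, List.mem_cons, List.not_mem_nil, or_false] at he
      rcases he with rfl|rfl|rfl|rfl|rfl|rfl|rfl|rfl|rfl|rfl|rfl|rfl|rfl|rfl|rfl|rfl|rfl|rfl <;> simp_all)]

-- ===== VERDICT (by name: the statement is the Claim_ definition above) =====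
theorem classify_context_type_spec : Claim_equal_classify_context_type := by
  intro json_path _
  unfold Spec_classify_context_type
  have hA : classify_context_type json_path = pvChainA
      (PySem.Str.isIn "knowledge_repository" (PySem.Str.lower json_path))
      (PySem.Str.isIn "compliance" (PySem.Str.lower json_path))
      (PySem.Str.isIn "case_studies" (PySem.Str.lower json_path))
      (PySem.Str.isIn "cross_cutting" (PySem.Str.lower json_path))
      (PySem.Str.isIn "analytics" (PySem.Str.lower json_path))
      (PySem.Str.isIn "organization" (PySem.Str.lower json_path))
      (PySem.Str.isIn "founder" (PySem.Str.lower json_path))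
      (PySem.Str.isIn "company_name" (PySem.Str.lower json_path))
      (PySem.Str.isIn "location" (PySem.Str.lower json_path))
      (PySem.Str.isIn "team" (PySem.Str.lower json_path))
      (PySem.Str.isIn "market_presence" (PySem.Str.lower json_path))
      (PySem.Str.isIn "customer" (PySem.Str.lower json_path))
      (PySem.Str.isIn "industry" (PySem.Str.lower json_path))
      (PySem.Str.isIn "clients" (PySem.Str.lower json_path))
      (PySem.Str.isIn "solution" (PySem.Str.lower json_path))
      (PySem.Str.isIn "capabilities" (PySem.Str.lower json_path))
      (PySem.Str.isIn "production" (PySem.Str.lower json_path))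
      (PySem.Str.isIn "quality" (PySem.Str.lower json_path)) := by
    simp only [classify_context_type, pvChainA, List.any_cons, List.any_nil,
      Bool.or_false, Bool.or_assoc]
  have hfold : pvKeywordTable.foldl (pvBest (PySem.Str.lower json_path)) none =
      (pvKeywordTable.map
        (fun e => (PySem.Str.isIn e.1 (PySem.Str.lower json_path), e.2))).foldl pvBestB none := by
    rw [List.foldl_map]
    have hfun : (fun (x : Option (Nat × String)) (y : String × Nat × String) =>
        pvBestB x (PySem.Str.isIn y.1 (PySem.Str.lower json_path), y.2)) =
        pvBest (PySem.Str.lower json_path) := by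
      funext x y
      simp [pvBest, pvBestB]
    rw [hfun]
  have hB : classify_context_type_alt json_path = pvFoldB
      (PySem.Str.isIn "knowledge_repository" (PySem.Str.lower json_path))
      (PySem.Str.isIn "compliance" (PySem.Str.lower json_path))
      (PySem.Str.isIn "case_studies" (PySem.Str.lower json_path))
      (PySem.Str.isIn "cross_cutting" (PySem.Str.lower json_path))
      (PySem.Str.isIn "analytics" (PySem.Str.lower json_path))
      (PySem.Str.isIn "organization" (PySem.Str.lower json_path))
      (PySem.Str.isIn "founder" (PySem.Str.lower json_path))
      (PySem.Str.isIn "company_name" (PySem.Str.lower json_path))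
      (PySem.Str.isIn "location" (PySem.Str.lower json_path))
      (PySem.Str.isIn "team" (PySem.Str.lower json_path))
      (PySem.Str.isIn "market_presence" (PySem.Str.lower json_path))
      (PySem.Str.isIn "customer" (PySem.Str.lower json_path))
      (PySem.Str.isIn "industry" (PySem.Str.lower json_path))
      (PySem.Str.isIn "clients" (PySem.Str.lower json_path))
      (PySem.Str.isIn "solution" (PySem.Str.lower json_path))
      (PySem.Str.isIn "capabilities" (PySem.Str.lower json_path))
      (PySem.Str.isIn "production" (PySem.Str.lower json_path))
      (PySem.Str.isIn "quality" (PySem.Str.lower json_path)) := by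
    show (match pvKeywordTable.foldl (pvBest (PySem.Str.lower json_path)) none with
          | some b => b.2 | none => "general_info") = _
    rw [hfold]
    rfl
  rw [hA, hB, pvChain_eq_fold]
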